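-- pv_equiv track=rewrite | github.com/suleiman-odeh/Detect-malicious-VSscoe-extensions | Detection of typosquatting and name collision/typo_technique.py | swapped_characters
-- ===== SOURCE A (Python) =====
-- def swapped_characters(badextension,goodextension):
--
--     if len(badextension)!= len(goodextension):
--         return False
--     i=0
--     while i< len(badextension):
--         if badextension[i] == goodextension[i]:
--             badextension = badextension[:i] + badextension[i + 1:]
--             goodextension = goodextension[:i] + goodextension[i + 1:]
--         else:
--             i += 1
--
--     if len(badextension)==2:
--         if(badextension[0]==goodextension[1] and badextension[1]==goodextension[0]):
--             return True
--
--     return False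
-- ===== SOURCE B (Python) =====
-- def swapped_characters(badextension, goodextension):
--     if len(badextension) != len(goodextension):
--         return False
--     diffs = [(a, b) for a, b in zip(badextension, goodextension) if a != b]
--     return len(diffs) == 2 and diffs[0] == (diffs[1][1], diffs[1][0])
-- ===== Notes on version B (the rewrite author's own statement) =====
-- stated objective: faster
-- what changed: Replaced the quadratic delete-matching-characters-by-slicing while loop with a single zip pass that collects the mismatched character pairs and checks there are exactly two and that they are swapped.
import Mathlib
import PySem

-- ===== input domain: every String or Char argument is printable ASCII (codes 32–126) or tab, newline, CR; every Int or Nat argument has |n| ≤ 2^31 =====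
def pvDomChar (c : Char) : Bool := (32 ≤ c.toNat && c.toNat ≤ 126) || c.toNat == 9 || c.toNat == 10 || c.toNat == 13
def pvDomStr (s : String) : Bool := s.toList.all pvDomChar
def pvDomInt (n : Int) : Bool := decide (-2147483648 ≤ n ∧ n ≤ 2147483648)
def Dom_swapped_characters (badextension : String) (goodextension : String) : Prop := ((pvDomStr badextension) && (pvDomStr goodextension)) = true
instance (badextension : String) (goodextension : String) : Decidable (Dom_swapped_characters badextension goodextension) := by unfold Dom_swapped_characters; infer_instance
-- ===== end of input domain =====

-- B replaces A's quadratic delete-equal-characters-by-slicing loop with a single zip pass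
-- collecting the mismatched pairs (objective: faster, O(n) vs O(n^2)).

-- ===== PORT A =====
-- the while loop: i only ever grows, deletion uses badextension[:i] + badextension[i+1:]
-- (= take i ++ drop (i+1), exact since 0 ≤ i < len); indexing bad[i]/good[i] via [·]?
-- (exact: i is a nonnegative in-range index whenever compared on reachable inputs)
def pvLoopA (bad : List Char) (good : List Char) (i : Nat) : List Char × List Char :=
  if _h : i < bad.length then
    if bad[i]? = good[i]? then
      pvLoopA (bad.take i ++ bad.drop (i + 1)) (good.take i ++ good.drop (i + 1)) i
    else
      pvLoopA bad good (i + 1)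
  else (bad, good)
termination_by bad.length - i
decreasing_by
  · simp only [List.length_append, List.length_take, List.length_drop]
    omega
  · omega

def swapped_characters (badextension : String) (goodextension : String) : Bool :=
  let bad := badextension.toList
  let good := goodextension.toList
  if bad.length ≠ good.length then false
  else
    let r := pvLoopA bad good 0
    if r.1.length = 2 then
      if r.1[0]? = r.2[1]? ∧ r.1[1]? = r.2[0]? then true else false
    else false

-- ===== PORT B =====
def swapped_characters_alt (badextension : String) (goodextension : String) : Bool :=
  if badextension.toList.length ≠ goodextension.toList.length then false
  else
    let diffs := (badextension.toList.zip goodextension.toList).filter (fun p => p.1 ≠ p.2)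
    decide (diffs.length = 2 ∧ diffs[0]? = diffs[1]?.map (fun p => (p.2, p.1)))

-- ===== PRECONDITION & SPEC =====
def Spec_swapped_characters (badextension : String) (goodextension : String) (out : Bool) : Prop := out = swapped_characters_alt badextension goodextension
instance (badextension : String) (goodextension : String) (out : Bool) : Decidable (Spec_swapped_characters badextension goodextension out) := by unfold Spec_swapped_characters; infer_instance

-- ===== CLAIM (what is proved, stated in full; the proofs are below) =====
def Claim_equal_swapped_characters : Prop := ∀ (badextension : String) (goodextension : String), Dom_swapped_characters badextension goodextension → Spec_swapped_characters badextension goodextension (swapped_characters badextension goodextension)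

-- ===== LEMMAS AND PROOFS =====

-- Invariant of A's loop: with equal-length lists whose first i aligned pairs all mismatch,
-- the loop returns exactly the mismatched pairs of the zip, unzipped.
theorem pvLoopA_eq_filter (bad good : List Char) (i : Nat)
    (hlen : bad.length = good.length)
    (hpre : ∀ p ∈ (bad.zip good).take i, p.1 ≠ p.2) :
    pvLoopA bad good i =
      (((bad.zip good).filter (fun p => p.1 ≠ p.2)).map Prod.fst,
       ((bad.zip good).filter (fun p => p.1 ≠ p.2)).map Prod.snd) := by
  rw [pvLoopA]
  by_cases h : i < bad.length
  · simp only [h, dif_pos]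
    have hz : (bad.zip good).length = bad.length := by
      simp [List.length_zip, hlen]
    have hig : i < good.length := hlen ▸ h
    by_cases heq : bad[i]? = good[i]?
    · rw [if_pos heq]
      have hchar : bad[i] = good[i] := by
        have := heq
        rw [List.getElem?_eq_getElem h, List.getElem?_eq_getElem hig] at this
        exact Option.some.inj this
      -- zip of the shortened lists = the zip with its i-th (matched) pair removed
      have hzip : (bad.take i ++ bad.drop (i + 1)).zip (good.take i ++ good.drop (i + 1))
          = (bad.zip good).take i ++ (bad.zip good).drop (i + 1) := by
        rw [List.zip_append (by simp [List.length_take]; omega)]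
        simp only [List.zip_eq_zipWith, List.take_zipWith, List.drop_zipWith]
      have hsplit : bad.zip good = (bad.zip good).take i ++ (bad.zip good)[i] :: (bad.zip good).drop (i + 1) := by
        conv_lhs => rw [← List.take_append_drop i (bad.zip good)]
        congr 1
        rw [List.drop_eq_getElem_cons (by omega)]
      have hZi : (bad.zip good)[i] = (bad[i], good[i]) := List.getElem_zip ..
      have hfil : ((bad.zip good).take i ++ (bad.zip good).drop (i + 1)).filter (fun p => decide (p.1 ≠ p.2))
          = (bad.zip good).filter (fun p => decide (p.1 ≠ p.2)) := by
        conv_rhs => rw [hsplit]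
        rw [List.filter_append, List.filter_append, List.filter_cons]
        simp [hZi, hchar]
      rw [pvLoopA_eq_filter _ _ i (by simp [List.length_take, List.length_drop]; omega) ?_]
      · rw [hzip]
        simp only [hfil]
      · intro p hp
        apply hpre
        rw [hzip, List.take_append_of_le_length (by simp [List.length_take]; omega)] at hp
        rw [List.take_take] at hp
        simpa [Nat.min_self] using hp
    · rw [if_neg heq]
      rw [pvLoopA_eq_filter _ _ (i + 1) hlen ?_]
      intro p hp
      rw [List.take_add_one] at hp
      rcases List.mem_append.1 hp with h1 | h1
      · exact hpre p h1
      · have hZi : (bad.zip good)[i]? = some (bad[i], good[i]) := by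
          rw [List.getElem?_eq_getElem (by omega)]
          simp [List.getElem_zip]
        simp only [hZi] at h1
        simp only [Option.toList, List.mem_singleton] at h1
        subst h1
        intro hc
        apply heq
        rw [List.getElem?_eq_getElem h, List.getElem?_eq_getElem hig]
        exact congrArg some hc
  · simp only [h, dif_neg, not_false_iff]
    have hz : (bad.zip good).length = bad.length := by simp [List.length_zip, hlen]
    have hall : ∀ p ∈ bad.zip good, p.1 ≠ p.2 := by
      intro p hp
      apply hpre
      rw [List.take_of_length_le (by omega)]
      exact hp
    rw [List.filter_eq_self.2 (by intro p hp; simpa using hall p hp)]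
    rw [List.map_fst_zip (le_of_eq hlen), List.map_snd_zip (le_of_eq hlen.symm)]
termination_by bad.length - i
decreasing_by
  · simp only [List.length_append, List.length_take, List.length_drop]; omega
  · omega

-- ===== VERDICT (by name: the statement is the Claim_ definition above) =====
theorem swapped_characters_spec : Claim_equal_swapped_characters := by
  intro badextension goodextension _
  unfold Spec_swapped_characters swapped_characters swapped_characters_alt
  set bad := badextension.toList
  set good := goodextension.toList
  by_cases hlen : bad.length = good.length
  · simp only [hlen, ne_eq, not_true_eq_false, if_false]
    rw [pvLoopA_eq_filter bad good 0 hlen (by simp)]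
    set F := (bad.zip good).filter (fun p => p.1 ≠ p.2) with hF
    by_cases h2 : F.length = 2
    · match F, h2 with
      | [p, q], _ =>
        simp only [List.map_cons, List.map_nil, List.length_cons, List.length_nil,
          List.getElem?_cons_zero, List.getElem?_cons_succ, Option.map_some,
          Option.some.injEq, Prod.ext_iff]
        by_cases hc1 : p.1 = q.2 <;> by_cases hc2 : p.2 = q.1 <;>
          simp [hc1, hc2] <;> first | exact hc2.symm | exact fun h => hc2 h.symm
    · have hmap : (F.map Prod.fst).length = F.length := List.length_map ..
      rw [if_neg (by simp [h2])]
      simp [h2]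
  · simp [hlen]
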